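-- pv_equiv track=rewrite | github.com/resakse/reez | audit/middleware.py | extract_resource_type
-- ===== SOURCE A (Python) =====
-- def extract_resource_type(path):
--     """
--     Extract resource type from API path
--
--     Maps API paths to resource types for better organization
--     """
--     resource_map = {
--         '/api/patients/': 'Patient',
--         '/api/pesakit/': 'Patient',
--         '/api/examinations/': 'Examination',
--         '/api/pemeriksaan/': 'Examination',
--         '/api/daftar/': 'Registration',
--         '/api/staff/': 'Staff',
--         '/api/modaliti/': 'Modality',
--         '/api/exam/': 'ExamType',
--     }
--
--     for api_path, resource_type in resource_map.items():
--         if path.startswith(api_path):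
--             return resource_type
--
--     return 'API'
-- ===== SOURCE B (Python) =====
-- def extract_resource_type(path):
--     """Extract resource type from API path (segment parse + one keyed lookup)."""
--     segment_map = {
--         'patients': 'Patient',
--         'pesakit': 'Patient',
--         'examinations': 'Examination',
--         'pemeriksaan': 'Examination',
--         'daftar': 'Registration',
--         'staff': 'Staff',
--         'modaliti': 'Modality',
--         'exam': 'ExamType',
--     }
--     if not path.startswith('/api/'):
--         return 'API'
--     rest = path[5:]
--     i = rest.find('/')
--     if i < 0:
--         return 'API'
--     return segment_map.get(rest[:i], 'API')
-- ===== Notes on version B (the rewrite author's own statement) =====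
-- stated objective: idiomatic
-- what changed: B replaces A's loop of eight full-prefix startswith scans with a single api-prefix check, extraction of the following path segment up to its closing slash, and one keyed dict lookup on that segment.
import Mathlib
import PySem

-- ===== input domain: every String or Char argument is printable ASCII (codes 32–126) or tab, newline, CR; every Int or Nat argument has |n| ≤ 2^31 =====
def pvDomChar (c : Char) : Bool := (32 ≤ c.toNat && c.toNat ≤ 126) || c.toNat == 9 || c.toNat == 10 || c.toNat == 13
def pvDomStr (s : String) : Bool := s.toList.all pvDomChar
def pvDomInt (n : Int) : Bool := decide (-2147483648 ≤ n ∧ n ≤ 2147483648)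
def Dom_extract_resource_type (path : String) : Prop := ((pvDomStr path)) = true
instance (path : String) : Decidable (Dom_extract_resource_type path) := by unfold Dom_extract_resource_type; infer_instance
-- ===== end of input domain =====

-- B replaces A's loop of eight full-prefix startswith tests with one '/api/' prefix check,
-- extraction of the next path segment, and a single keyed dict lookup (idiomatic; same cost).

-- ===== PORT A =====
-- the dict literal resource_map (string keys, insertion order)
def pvResourceMap : List (String × String) :=
  [("/api/patients/", "Patient"),
   ("/api/pesakit/", "Patient"),
   ("/api/examinations/", "Examination"),
   ("/api/pemeriksaan/", "Examination"),
   ("/api/daftar/", "Registration"),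
   ("/api/staff/", "Staff"),
   ("/api/modaliti/", "Modality"),
   ("/api/exam/", "ExamType")]

-- the 'for api_path, resource_type in resource_map.items(): if path.startswith(...)' loop
def pvAGo (path : String) : List (String × String) → String
  | [] => "API"
  | (p, r) :: rest => if PySem.Str.startswith path p then r else pvAGo path rest

def extract_resource_type (path : String) : String := pvAGo path pvResourceMap

-- ===== PORT B =====
def pvSegmentMap : PySem.Dict String String :=
  ⟨[("patients", "Patient"),
    ("pesakit", "Patient"),
    ("examinations", "Examination"),
    ("pemeriksaan", "Examination"),
    ("daftar", "Registration"),
    ("staff", "Staff"),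
    ("modaliti", "Modality"),
    ("exam", "ExamType")]⟩

def extract_resource_type_alt (path : String) : String :=
  if !(PySem.Str.startswith path "/api/") then "API"
  else
    let rest := PySem.Str.slice path (some 5) none   -- path[5:]
    let i := PySem.Str.find rest "/"                  -- rest.find('/')
    if i < 0 then "API"
    else PySem.Dict.getD pvSegmentMap (PySem.Str.slice rest none (some i)) "API"  -- segment_map.get(rest[:i], 'API')

-- ===== PRECONDITION & SPEC =====
def Spec_extract_resource_type (path : String) (out : String) : Prop := out = extract_resource_type_alt path
instance (path : String) (out : String) : Decidable (Spec_extract_resource_type path out) := by unfold Spec_extract_resource_type; infer_instance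

-- ===== CLAIM (what is proved, stated in full; the proofs are below) =====
def Claim_equal_extract_resource_type : Prop := ∀ (path : String), Dom_extract_resource_type path → Spec_extract_resource_type path (extract_resource_type path)

-- ===== LEMMAS AND PROOFS =====

-- Specification of Python's str.find for the single-character needle '/':
-- either there is no slash and the result is -1, or the string splits at the FIRST slash
-- and the result is the accumulator plus the slash-free prefix's length.
theorem pvFindGoSpec (s : List Char) (k : Nat) :
    ('/' ∉ s ∧ PySem.Chars.find.go ['/'] s k = -1) ∨
    (∃ pre suf, s = pre ++ '/' :: suf ∧ '/' ∉ pre ∧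
      PySem.Chars.find.go ['/'] s k = (k : Int) + pre.length) := by
  induction s generalizing k with
  | nil => exact Or.inl ⟨by simp, rfl⟩
  | cons c t ih =>
    by_cases hc : c = '/'
    · subst hc
      exact Or.inr ⟨[], t, by simp, by simp, by simp [PySem.Chars.find.go, List.isPrefixOf]⟩
    · rcases ih (k + 1) with ⟨hmem, heq⟩ | ⟨pre, suf, hs, hp, heq⟩
      · refine Or.inl ⟨?_, ?_⟩
        · simp [hmem, Ne.symm hc]
        · simpa [PySem.Chars.find.go, List.isPrefixOf, Ne.symm hc] using heq
      · refine Or.inr ⟨c :: pre, suf, by simp [hs], by simp [hp, Ne.symm hc], ?_⟩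
        have hstep : PySem.Chars.find.go ['/'] (c :: t) k = PySem.Chars.find.go ['/'] t (k + 1) := by
          simp [PySem.Chars.find.go, List.isPrefixOf, Ne.symm hc]
        rw [hstep, heq]
        simp [List.length_cons]
        omega

-- A slash-terminated, slash-free prefix of 'pre ++ '/' :: suf' (with pre slash-free) is exactly pre.
theorem pvPreAux (s : List Char) : ∀ (pre suf : List Char), '/' ∉ s → '/' ∉ pre →
    (s ++ ['/'] <+: pre ++ '/' :: suf) → s = pre := by
  induction s with
  | nil =>
    intro pre suf _ hp h
    cases pre with
    | nil => rfl
    | cons b bt =>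
      exfalso
      rcases h with ⟨t2, ht⟩
      simp at ht
      exact hp (by simp [← ht.1])
  | cons a t ih =>
    intro pre suf hs hp h
    cases pre with
    | nil =>
      exfalso
      rcases h with ⟨t2, ht⟩
      simp at ht
      exact hs (by simp [ht.1])
    | cons b bt =>
      rcases h with ⟨t2, ht⟩
      simp at ht
      obtain ⟨rfl, ht2⟩ := ht
      have := ih bt suf (fun hm => hs (List.mem_cons_of_mem _ hm))
        (fun hm => hp (List.mem_cons_of_mem _ hm)) ⟨t2, by simpa using ht2⟩
      rw [this]

theorem pvPreEqIff (s pre suf : List Char) (hs : '/' ∉ s) (hp : '/' ∉ pre) :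
    (s ++ ['/'] <+: pre ++ '/' :: suf) ↔ s = pre := by
  constructor
  · exact pvPreAux s pre suf hs hp
  · rintro rfl
    exact ⟨suf, by simp⟩

-- ===== VERDICT (by name: the statement is the Claim_ definition above) =====
theorem extract_resource_type_spec : Claim_equal_extract_resource_type := by
  unfold Claim_equal_extract_resource_type
  intro path _
  show extract_resource_type path = extract_resource_type_alt path
  by_cases h5 : PySem.Str.startswith path "/api/" = true
  · -- path starts with '/api/'
    have h5' : "/api/".toList <+: path.toList := by
      have := (PySem.Chars.startswith_iff path.toList "/api/".toList).mp
        (by simpa [PySem.Str.startswith_eq] using h5)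
      exact this
    rcases h5' with ⟨rest', hrest'⟩
    have hpath : path.toList = "/api/".toList ++ rest' := hrest'.symm
    -- the port's rest = path[5:]
    have hrestL : (PySem.Str.slice path (some 5) none).toList = rest' := by
      rw [PySem.Str.slice, String.toList_ofList, PySem.Chars.slice,
        PySem.List.slice_from path.toList (by norm_num), hpath]
      simp
    have hfind : PySem.Str.find (PySem.Str.slice path (some 5) none) "/"
        = PySem.Chars.find.go ['/'] rest' 0 := by
      rw [PySem.Str.find_eq, hrestL]; rfl
    rcases pvFindGoSpec rest' 0 with ⟨hnos, hgo⟩ | ⟨pre, suf, hsplit, hpre, hgo⟩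
    · -- no slash after '/api/': both return "API"
      have key2 : ∀ (p : String) (s : List Char),
          p.toList = "/api/".toList ++ (s ++ ['/']) → PySem.Str.startswith path p = false := by
        intro p s hp
        rw [Bool.eq_false_iff]
        intro hsw
        have hpr : p.toList <+: path.toList := by
          have := (PySem.Chars.startswith_iff path.toList p.toList).mp
            (by simpa [PySem.Str.startswith_eq] using hsw)
          exact this
        rw [hp, hpath, List.prefix_append_right_inj] at hpr
        exact hnos (hpr.subset (by simp))
      have hi : PySem.Str.find (PySem.Str.slice path (some 5) none) "/" < 0 := by
        rw [hfind, hgo]; norm_num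
      simp only [extract_resource_type, pvAGo, pvResourceMap, extract_resource_type_alt,
        key2 "/api/patients/" "patients".toList (by decide),
        key2 "/api/pesakit/" "pesakit".toList (by decide),
        key2 "/api/examinations/" "examinations".toList (by decide),
        key2 "/api/pemeriksaan/" "pemeriksaan".toList (by decide),
        key2 "/api/daftar/" "daftar".toList (by decide),
        key2 "/api/staff/" "staff".toList (by decide),
        key2 "/api/modaliti/" "modaliti".toList (by decide),
        key2 "/api/exam/" "exam".toList (by decide),
        h5, hi, if_true, if_false, Bool.not_true, Bool.false_eq_true]
    · -- a slash after '/api/': segment is the slash-free pre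
      have hgoeq : PySem.Chars.find.go ['/'] rest' 0 = (pre.length : Int) := by
        rw [hgo]; ring
      have hi : ¬ PySem.Str.find (PySem.Str.slice path (some 5) none) "/" < 0 := by
        rw [hfind, hgoeq]; omega
      -- the port's segment rest[:i]
      have hseg : (PySem.Str.slice (PySem.Str.slice path (some 5) none) none
          (some (PySem.Str.find (PySem.Str.slice path (some 5) none) "/"))).toList = pre := by
        rw [hfind, hgoeq, PySem.Str.slice, String.toList_ofList, PySem.Chars.slice,
          PySem.List.slice_to _ (by positivity), hrestL, hsplit, Int.toNat_natCast]
        exact List.take_left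
      -- each A test is a comparison of its segment with pre
      have hswE : ∀ (p : String) (s : List Char),
          p.toList = "/api/".toList ++ (s ++ ['/']) → '/' ∉ s →
          PySem.Str.startswith path p = decide (s = pre) := by
        intro p s hp hs
        rw [Bool.eq_iff_iff, decide_eq_true_eq, PySem.Str.startswith_eq,
          PySem.Chars.startswith_iff, hp, hpath, hsplit, List.prefix_append_right_inj]
        exact pvPreEqIff s pre suf hs hpre
      -- each B key comparison is the same comparison
      have hbe : ∀ a : String,
          (a == PySem.Str.slice (PySem.Str.slice path (some 5) none) none
            (some (PySem.Str.find (PySem.Str.slice path (some 5) none) "/")))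
          = decide (a.toList = pre) := by
        intro a
        rw [Bool.eq_iff_iff, beq_iff_eq, decide_eq_true_eq, ← hseg]
        exact ⟨fun h => by rw [h], fun h => String.toList_inj.mp h⟩
      simp only [extract_resource_type, pvAGo, pvResourceMap, extract_resource_type_alt,
        h5, Bool.not_true, Bool.false_eq_true, if_false, hi,
        PySem.Dict.getD, PySem.Dict.get?, pvSegmentMap, List.find?,
        hswE "/api/patients/" "patients".toList (by decide) (by decide),
        hswE "/api/pesakit/" "pesakit".toList (by decide) (by decide),
        hswE "/api/examinations/" "examinations".toList (by decide) (by decide),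
        hswE "/api/pemeriksaan/" "pemeriksaan".toList (by decide) (by decide),
        hswE "/api/daftar/" "daftar".toList (by decide) (by decide),
        hswE "/api/staff/" "staff".toList (by decide) (by decide),
        hswE "/api/modaliti/" "modaliti".toList (by decide) (by decide),
        hswE "/api/exam/" "exam".toList (by decide) (by decide),
        hbe]
      clear hbe hswE hseg hi hgoeq hgo hfind hrestL hpath hrest' hsplit hpre h5
      split_ifs <;> simp only [*, Option.map_some, Option.map_none, Option.getD_some,
        Option.getD_none]
  · -- path does not start with '/api/': both return "API"
    have key : ∀ (p : String), ("/api/".toList <+: p.toList) →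
        PySem.Str.startswith path p = false := by
      intro p hp
      rw [Bool.eq_false_iff]
      intro hsw
      apply h5
      have hpr : p.toList <+: path.toList := by
        have := (PySem.Chars.startswith_iff path.toList p.toList).mp
          (by simpa [PySem.Str.startswith_eq] using hsw)
        exact this
      rw [PySem.Str.startswith_eq]
      exact (PySem.Chars.startswith_iff _ _).mpr (hp.trans hpr)
    have h5f : PySem.Str.startswith path "/api/" = false := Bool.eq_false_iff.mpr h5
    simp only [extract_resource_type, pvAGo, pvResourceMap, extract_resource_type_alt,
      key "/api/patients/" (by decide), key "/api/pesakit/" (by decide),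
      key "/api/examinations/" (by decide), key "/api/pemeriksaan/" (by decide),
      key "/api/daftar/" (by decide), key "/api/staff/" (by decide),
      key "/api/modaliti/" (by decide), key "/api/exam/" (by decide),
      h5f, Bool.not_false, if_true, if_false, Bool.false_eq_true]
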